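-- pv_equiv track=rewrite | github.com/JASON9620/python | chengyu/test.py | caculate_number_with_different_supplier
-- ===== SOURCE A (Python) =====
-- def caculate_number_with_different_supplier(dict):
-- 	temp = []
-- 	for i in dict:
-- 		tt = [i, {}]
-- 		for j in dict[i]:
-- 			if j[0] in tt[1]:
-- 				tt[1][j[0]] += j[1]
-- 			else:
-- 				tt[1][j[0]] = j[1]
-- 		t = 0
-- 		for j in tt[1]:
-- 			t = t + tt[1][j]
-- 		temp.append([tt[0], t])
-- 	return temp
-- ===== SOURCE B (Python) =====
-- def caculate_number_with_different_supplier(dict):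
-- 	return [[key, sum(pair[1] for pair in dict[key])] for key in dict]
-- ===== Notes on version B (the rewrite author's own statement) =====
-- stated objective: simpler
-- what changed: Drops the per-key grouping dict entirely and sums each key's pair values directly in a single comprehension; integer addition is associative/commutative so grouping by supplier before summing changes nothing.
import Mathlib
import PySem

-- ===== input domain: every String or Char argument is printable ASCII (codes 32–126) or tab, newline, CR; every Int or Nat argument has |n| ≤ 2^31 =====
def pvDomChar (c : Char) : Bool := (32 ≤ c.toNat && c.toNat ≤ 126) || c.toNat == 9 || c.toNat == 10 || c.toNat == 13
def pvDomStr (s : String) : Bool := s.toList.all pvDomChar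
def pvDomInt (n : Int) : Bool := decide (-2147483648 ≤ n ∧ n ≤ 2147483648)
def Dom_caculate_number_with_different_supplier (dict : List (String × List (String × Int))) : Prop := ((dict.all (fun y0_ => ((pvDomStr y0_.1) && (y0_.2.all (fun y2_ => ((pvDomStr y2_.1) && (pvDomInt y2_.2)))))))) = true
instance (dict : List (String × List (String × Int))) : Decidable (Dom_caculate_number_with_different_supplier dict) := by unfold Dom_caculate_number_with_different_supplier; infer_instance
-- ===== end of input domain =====

-- B replaces A's per-key grouping dict with a direct one-pass sum of each key's values (simpler; exact since the values are integers).

-- ===== PORT A =====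
-- inner grouping loop: 'for j in dict[i]: if j[0] in tt[1]: tt[1][j[0]] += j[1] else: tt[1][j[0]] = j[1]'
def pvGroupA (pairs : List (String × Int)) : PySem.Dict String Int :=
  pairs.foldl
    (fun d j =>
      if d.contains j.1 then d.insert j.1 (d.getD j.1 0 + j.2)
      else d.insert j.1 j.2)
    PySem.Dict.empty

def caculate_number_with_different_supplier (dict : List (String × List (String × Int))) : List (String × Int) :=
  dict.foldl
    (fun temp i =>
      let tt1 := pvGroupA i.2
      -- 't = 0; for j in tt[1]: t = t + tt[1][j]'
      let t := tt1.keys.foldl (fun t j => t + tt1.getD j 0) 0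
      temp ++ [(i.1, t)])
    []

-- ===== PORT B =====
def caculate_number_with_different_supplier_alt (dict : List (String × List (String × Int))) : List (String × Int) :=
  dict.map (fun i => (i.1, (i.2.map (fun p => p.2)).sum))

-- ===== PRECONDITION & SPEC =====
def Spec_caculate_number_with_different_supplier (dict : List (String × List (String × Int))) (out : List (String × Int)) : Prop := out = caculate_number_with_different_supplier_alt dict
instance (dict : List (String × List (String × Int))) (out : List (String × Int)) : Decidable (Spec_caculate_number_with_different_supplier dict out) := by unfold Spec_caculate_number_with_different_supplier; infer_instance

-- ===== CLAIM (what is proved, stated in full; the proofs are below) =====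
def Claim_equal_caculate_number_with_different_supplier : Prop := ∀ (dict : List (String × List (String × Int))), Dom_caculate_number_with_different_supplier dict → Spec_caculate_number_with_different_supplier dict (caculate_number_with_different_supplier dict)

-- ===== LEMMAS AND PROOFS =====

-- replacing the value at the (unique) occurrence of k adds v to the sum
theorem pv_sum_map_update (ks : List String) (k : String) (f : String → Int) (v : Int)
    (hnd : ks.Nodup) (hk : k ∈ ks) :
    (ks.map (fun c => if c = k then f k + v else f c)).sum = (ks.map f).sum + v := by
  induction ks with
  | nil => cases hk
  | cons a t ih =>
    rcases List.nodup_cons.mp hnd with ⟨ha, hnt⟩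
    by_cases hak : a = k
    · subst hak
      have : (t.map (fun c => if c = a then f a + v else f c)) = t.map f := by
        apply List.map_congr_left
        intro c hc
        have : c ≠ a := fun h => ha (h ▸ hc)
        simp [this]
      simp [this]
      ring
    · have hkt : k ∈ t := by cases hk with
        | head => exact absurd rfl hak
        | tail _ h => exact h
      simp only [List.map_cons, List.sum_cons, ih hnt hkt, if_neg hak]
      ring

-- one step of A's grouping loop adds p.2 to the sum of the dict's values
theorem pv_step_sum (d : PySem.Dict String Int) (p : String × Int) (hnd : d.keys.Nodup) :
    let d' := if d.contains p.1 then d.insert p.1 (d.getD p.1 0 + p.2) else d.insert p.1 p.2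
    (d'.keys.map (fun k => d'.getD k 0)).sum = (d.keys.map (fun k => d.getD k 0)).sum + p.2 := by
  by_cases hc : d.contains p.1 = true
  · simp only [hc, if_true]
    rw [PySem.Dict.keys_insert_of_contains _ _ hc]
    have hmem : p.1 ∈ d.keys := (PySem.Dict.contains_iff_mem_keys d p.1).mp hc
    have hmap : (d.keys.map (fun k => (d.insert p.1 (d.getD p.1 0 + p.2)).getD k 0)) =
        d.keys.map (fun c => if c = p.1 then d.getD p.1 0 + p.2 else d.getD c 0) := by
      apply List.map_congr_left
      intro c _
      rw [PySem.Dict.getD_insert]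
    rw [hmap]
    exact pv_sum_map_update d.keys p.1 (fun c => d.getD c 0) p.2 hnd hmem
  · have hc' : d.contains p.1 = false := by simpa using hc
    simp only [hc', Bool.false_eq_true, if_false]
    rw [PySem.Dict.keys_insert_of_not_contains _ _ hc']
    have hnmem : p.1 ∉ d.keys := fun h =>
      hc ((PySem.Dict.contains_iff_mem_keys d p.1).mpr h)
    rw [List.map_append, List.sum_append]
    have hmap : (d.keys.map (fun k => (d.insert p.1 p.2).getD k 0)) =
        d.keys.map (fun c => d.getD c 0) := by
      apply List.map_congr_left
      intro c hcm
      rw [PySem.Dict.getD_insert]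
      have : c ≠ p.1 := fun h => hnmem (h ▸ hcm)
      simp [this]
    rw [hmap]
    simp [PySem.Dict.getD_insert]

-- the grouping loop's running dict keeps nodup keys
theorem pv_step_nodup (d : PySem.Dict String Int) (p : String × Int) (hnd : d.keys.Nodup) :
    (if d.contains p.1 then d.insert p.1 (d.getD p.1 0 + p.2) else d.insert p.1 p.2).keys.Nodup := by
  split <;> exact PySem.Dict.nodup_keys_insert _ _ _ hnd

-- invariant: after grouping l into d, the values-sum grew by the sum of l's values
theorem pv_group_sum (l : List (String × Int)) (d : PySem.Dict String Int) (hnd : d.keys.Nodup) :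
    let d' := l.foldl (fun d j => if d.contains j.1 then d.insert j.1 (d.getD j.1 0 + j.2)
        else d.insert j.1 j.2) d
    (d'.keys.map (fun k => d'.getD k 0)).sum
      = (d.keys.map (fun k => d.getD k 0)).sum + (l.map (fun p => p.2)).sum := by
  induction l generalizing d with
  | nil => simp
  | cons p t ih =>
    simp only [List.foldl_cons, List.map_cons, List.sum_cons]
    rw [ih _ (pv_step_nodup d p hnd), pv_step_sum d p hnd]
    ring

-- A's per-key total equals the direct sum of the values
theorem pv_inner_eq (pairs : List (String × Int)) :
    (pvGroupA pairs).keys.foldl (fun t j => t + (pvGroupA pairs).getD j 0) 0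
      = (pairs.map (fun p => p.2)).sum := by
  rw [PySem.List.foldl_add]
  have := pv_group_sum pairs PySem.Dict.empty (by simp)
  simp only [pvGroupA]
  simp only at this
  rw [this]
  simp [PySem.Dict.keys_empty]

-- ===== VERDICT (by name: the statement is the Claim_ definition above) =====
theorem caculate_number_with_different_supplier_spec : Claim_equal_caculate_number_with_different_supplier := by
  intro dict _
  unfold Spec_caculate_number_with_different_supplier
  unfold caculate_number_with_different_supplier caculate_number_with_different_supplier_alt
  rw [PySem.List.foldl_append_singleton_eq_map]
  simp only [List.nil_append]
  apply List.map_congr_left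
  intro i _
  exact congrArg (fun t => (i.1, t)) (pv_inner_eq i.2)
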